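-- pv_equiv track=rewrite | github.com/shitizg/word-pyramid | lambdas/lambda_function.py | is_pyramid
-- ===== SOURCE A (Python) =====
-- def is_pyramid(word):
--     pyramid_dictionary = {}
--
--
--     for letter in word:
--         if letter in pyramid_dictionary.keys():
--             pyramid_dictionary[letter] += 1
--         else:
--             pyramid_dictionary[letter] = 1
--
--     counts = sorted(pyramid_dictionary.values())
--
--     return all(counts[i] == i+1 for i in range(len(counts)))
-- ===== SOURCE B (Python) =====
-- def is_pyramid(word):
--     counts = {}
--     for letter in word:
--         counts[letter] = counts.get(letter, 0) + 1
--     k = len(counts)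
--     # no sort: counts form 1..k iff they are k distinct values with maximum k
--     return k == 0 or (max(counts.values()) == k and len(set(counts.values())) == k)
-- ===== Notes on version B (the rewrite author's own statement) =====
-- stated objective: alternative
-- what changed: B drops the sort-and-positional-compare: it checks that the k letter counts are pairwise distinct and have maximum k, which characterises the multiset {1,..,k}.
import Mathlib
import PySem

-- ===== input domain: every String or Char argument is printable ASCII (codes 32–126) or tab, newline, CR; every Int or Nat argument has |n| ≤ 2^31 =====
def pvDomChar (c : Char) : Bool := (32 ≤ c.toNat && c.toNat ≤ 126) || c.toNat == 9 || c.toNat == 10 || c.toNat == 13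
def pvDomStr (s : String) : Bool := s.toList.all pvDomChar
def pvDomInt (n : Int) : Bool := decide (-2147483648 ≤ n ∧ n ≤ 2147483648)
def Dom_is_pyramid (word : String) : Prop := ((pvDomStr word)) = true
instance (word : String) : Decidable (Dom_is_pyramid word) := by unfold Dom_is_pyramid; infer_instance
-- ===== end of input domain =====

-- B drops A's sort-and-positional-compare: the k letter counts form {1,..,k} iff they are pairwise distinct with maximum k (alternative decomposition; no speed claim).

-- ===== PORT A =====
def is_pyramid (word : String) : Bool :=
  let pyramid_dictionary : PySem.Dict Char Int :=
    word.toList.foldl (fun d letter =>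
      if (PySem.Dict.keys d).contains letter then
        d.insert letter (d.getD letter 0 + 1)      -- pyramid_dictionary[letter] += 1
      else
        d.insert letter 1) PySem.Dict.empty        -- pyramid_dictionary[letter] = 1
  let counts := PySem.List.sorted (PySem.Dict.values pyramid_dictionary) (fun v => v) false
  (PySem.List.pyRange 0 (counts.length : Int) 1).all
    (fun i => PySem.List.pyGet? counts i == some (i + 1))

-- ===== PORT B =====
def is_pyramid_alt (word : String) : Bool :=
  let counts : PySem.Dict Char Int :=
    word.toList.foldl (fun d letter => d.insert letter (d.getD letter 0 + 1)) PySem.Dict.empty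
  let k := PySem.Dict.size counts
  k == 0 ||
    (PySem.List.max? (PySem.Dict.values counts) (fun v => v) == some (k : Int)
      && (PySem.Set.ofList (PySem.Dict.values counts)).length == k)

-- ===== PRECONDITION & SPEC =====
def Spec_is_pyramid (word : String) (out : Bool) : Prop := out = is_pyramid_alt word
instance (word : String) (out : Bool) : Decidable (Spec_is_pyramid word out) := by unfold Spec_is_pyramid; infer_instance

-- ===== CLAIM (what is proved, stated in full; the proofs are below) =====
def Claim_equal_is_pyramid : Prop := ∀ (word : String), Dom_is_pyramid word → Spec_is_pyramid word (is_pyramid word)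

-- ===== LEMMAS AND PROOFS =====

-- [1,2,…,k] as a list of Ints
def pyramidList (k : Nat) : List Int := List.map (fun i : Nat => (i : Int) + 1) (List.range k)

theorem mem_pyramidList (k : Nat) (x : Int) : x ∈ pyramidList k ↔ 1 ≤ x ∧ x ≤ (k : Int) := by
  unfold pyramidList
  rw [List.mem_map]
  constructor
  · rintro ⟨i, hi, rfl⟩
    rw [List.mem_range] at hi
    omega
  · intro h
    exact ⟨(x - 1).toNat, by rw [List.mem_range]; omega, by omega⟩

theorem pyramidList_nodup (k : Nat) : (pyramidList k).Nodup := by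
  unfold pyramidList
  refine List.Nodup.map ?_ List.nodup_range
  intro a b h
  simp only [Int.add_left_inj, Int.natCast_inj] at h
  exact h

theorem pyramidList_toFinset (k : Nat) : (pyramidList k).toFinset = Finset.Icc 1 (k : Int) := by
  ext x
  rw [List.mem_toFinset, mem_pyramidList, Finset.mem_Icc]

-- |set(l)| is the number of distinct elements of l
theorem ofList_length (l : List Int) : (PySem.Set.ofList l).length = l.toFinset.card := by
  have h1 : (PySem.Set.ofList l).toFinset = l.toFinset := by
    ext x; simp [List.mem_toFinset, PySem.Set.mem_ofList]
  rw [← List.toFinset_card_of_nodup (PySem.Set.nodup_ofList l), h1]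

theorem card_eq_nodup (l : List Int) (h : l.toFinset.card = l.length) : l.Nodup := by
  rw [List.card_toFinset] at h
  have := (List.dedup_sublist l).eq_of_length h
  rw [← this]; exact List.nodup_dedup l

-- max(l) = m when m is a member and an upper bound
theorem max?_eq_some_of (l : List Int) (m : Int) (hm : m ∈ l) (hub : ∀ y ∈ l, y ≤ m) :
    PySem.List.max? l (fun v => v) = some m := by
  cases l with
  | nil => simp at hm
  | cons x t =>
    rw [PySem.List.max?_id_cons]
    have h1 := PySem.List.le_foldl_max t x
    have h2 := PySem.List.foldl_max_mem t x
    have hle : t.foldl max x ≤ m := by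
      rcases h2 with h | h
      · rw [h]; exact hub x List.mem_cons_self
      · exact hub _ (List.mem_cons_of_mem _ h)
    have hge : m ≤ t.foldl max x := by
      rcases hm with _ | hm
      · exact h1.1
      · next hm => exact h1.2 m hm
    exact congrArg some (le_antisymm hle hge)

-- B's check holds iff the sorted counts are exactly [1,…,k] (for positive counts)
theorem b_check_iff (l : List Int) (hpos : ∀ v ∈ l, 1 ≤ v) :
    ((l.length == 0 ||
      (PySem.List.max? l (fun v => v) == some (l.length : Int)
        && (PySem.Set.ofList l).length == l.length)) = true)
      ↔ PySem.List.sorted l (fun v => v) false = pyramidList l.length := by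
  have hplt : (pyramidList l.length).Pairwise (fun a b => a < b) := by
    unfold pyramidList
    refine List.Pairwise.map _ ?_ List.pairwise_lt_range
    intro a b h
    omega
  constructor
  · intro h
    simp only [Bool.or_eq_true, Bool.and_eq_true, beq_iff_eq] at h
    rcases h with h0 | ⟨hmax, hdist⟩
    · have : l = [] := List.length_eq_zero_iff.mp (by exact_mod_cast h0)
      subst this; rfl
    · have hnd : l.Nodup := card_eq_nodup l (by rw [← ofList_length]; exact_mod_cast hdist)
      have hub := PySem.List.max?_isMax hmax
      have hsub : l.toFinset ⊆ Finset.Icc 1 (l.length : Int) := by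
        intro x hx
        rw [List.mem_toFinset] at hx
        exact Finset.mem_Icc.mpr ⟨hpos x hx, hub x hx⟩
      have hfin : l.toFinset = Finset.Icc 1 (l.length : Int) := by
        apply Finset.eq_of_subset_of_card_le hsub
        rw [Int.card_Icc, List.toFinset_card_of_nodup hnd]
        omega
      have hperm : (pyramidList l.length).Perm l := by
        apply List.perm_of_nodup_nodup_toFinset_eq (pyramidList_nodup _) hnd
        rw [pyramidList_toFinset, hfin]
      exact PySem.List.sorted_eq_of_perm_of_pairwise_lt l (pyramidList l.length) _ hperm hplt
  · intro h
    have hperm : l.Perm (pyramidList l.length) := by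
      have hp := PySem.List.sorted_perm l (fun v => v) false
      rw [h] at hp
      exact hp.symm
    simp only [Bool.or_eq_true, Bool.and_eq_true, beq_iff_eq]
    by_cases h0 : l.length = 0
    · left; exact_mod_cast h0
    · right
      have hnd : l.Nodup := hperm.nodup_iff.mpr (pyramidList_nodup _)
      constructor
      · apply max?_eq_some_of
        · exact hperm.mem_iff.mpr ((mem_pyramidList _ _).mpr ⟨by omega, le_refl _⟩)
        · intro y hy
          exact ((mem_pyramidList _ _).mp (hperm.mem_iff.mp hy)).2
      · rw [ofList_length, List.toFinset_card_of_nodup hnd]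

-- A's range/index check holds iff the sorted counts are exactly [1,…,k]
theorem a_check_iff (l : List Int) :
    ((PySem.List.pyRange 0 ((PySem.List.sorted l (fun v => v) false).length : Int) 1).all
      (fun i => PySem.List.pyGet? (PySem.List.sorted l (fun v => v) false) i == some (i + 1)) = true)
      ↔ PySem.List.sorted l (fun v => v) false = pyramidList l.length := by
  set s := PySem.List.sorted l (fun v => v) false with hs
  have hlen : s.length = l.length := (PySem.List.sorted_perm l (fun v => v) false).length_eq
  rw [List.all_eq_true]
  constructor
  · intro h
    apply List.ext_getElem (by unfold pyramidList; simp [hlen])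
    intro i h1 h2
    have hmem := h (i : Int) (by rw [PySem.List.mem_pyRange_one]; omega)
    simp only [PySem.List.pyGet?_natCast, beq_iff_eq, List.getElem?_eq_getElem h1,
      Option.some.injEq] at hmem
    unfold pyramidList
    rw [List.getElem_map, hmem]
    rw [List.getElem_range]
  · intro h i hi
    rw [PySem.List.mem_pyRange_one] at hi
    rw [PySem.List.pyGet?_eq_some_getElem s hi.1 (by exact_mod_cast hi.2)]
    rw [beq_iff_eq, Option.some.injEq]
    simp only [h]
    unfold pyramidList
    simp only [List.getElem_map, List.getElem_range]
    omega

-- A's counting loop builds Counter(word)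
theorem a_fold_eq_counter (cs : List Char) :
    cs.foldl (fun d letter =>
      if (PySem.Dict.keys d).contains letter then
        d.insert letter (d.getD letter 0 + 1)
      else
        d.insert letter 1) PySem.Dict.empty = PySem.Dict.counter cs := by
  rw [← PySem.Dict.foldl_insert_getD_add_one_eq_counter]
  apply PySem.List.foldl_congr_mem
  intro d x _
  split_ifs with hc
  · rfl
  · rw [PySem.Dict.getD_of_not_contains]
    · norm_num
    · rw [PySem.Dict.contains_eq_decide_mem_keys]
      simpa using hc

-- every value of the counter is at least 1
theorem counter_values_pos (cs : List Char) :
    ∀ v ∈ (PySem.Dict.counter cs).values, 1 ≤ v := by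
  intro v hv
  rw [PySem.Dict.values, PySem.Dict.items_counter] at hv
  simp at hv
  obtain ⟨c, hc, rfl⟩ := hv
  exact_mod_cast List.count_pos_iff.mpr hc

-- ===== VERDICT (by name: the statement is the Claim_ definition above) =====
theorem is_pyramid_spec : Claim_equal_is_pyramid := by
  intro word _
  unfold Spec_is_pyramid is_pyramid is_pyramid_alt
  rw [a_fold_eq_counter, PySem.Dict.foldl_insert_getD_add_one_eq_counter]
  simp only []
  have hsize : PySem.Dict.size (PySem.Dict.counter word.toList)
      = (PySem.Dict.values (PySem.Dict.counter word.toList)).length := by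
    rw [PySem.Dict.values, PySem.Dict.size, List.length_map]
  rw [hsize, Bool.eq_iff_iff, a_check_iff,
    ← b_check_iff _ (counter_values_pos word.toList)]
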